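-- pv_equiv track=rewrite | github.com/amlannandy/datastructures | Matrix/Boundary of Matrix.py | getBoundary
-- ===== SOURCE A (Python) =====
-- def getBoundary(arr):
--     m = len(arr)
--     n = len(arr[0])
--     res = []
--     last = []
--     for i in range(m):
--         if i == 0:
--             res.extend(arr[i])
--         elif i == m - 1:
--             res.extend(arr[i][::-1])
--         else:
--             res.append(arr[i][-1])
--             if n > 1:
--                 last.insert(0, arr[i][0])
--     res.extend(last)
--     return res
-- ===== SOURCE B (Python) =====
-- def getBoundary(arr):
--     # Divide-and-conquer over the interior rows: edges(rows) returns the pair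
--     # (right-edge elements top-to-bottom, left-edge elements bottom-to-top),
--     # merging sub-results instead of classifying indices or using insert(0).
--     def edges(rows):
--         if not rows:
--             return [], []
--         if len(rows) == 1:
--             return [rows[0][-1]], [rows[0][0]]
--         m = len(rows) // 2
--         dl, ul = edges(rows[:m])
--         dr, ur = edges(rows[m:])
--         return dl + dr, ur + ul
--
--     res = list(arr[0])
--     if len(arr) > 1:
--         down, up = edges(arr[1:-1])
--         res += down + arr[-1][::-1]
--         if len(arr[0]) > 1:
--             res += up
--     return res
-- ===== Notes on version B (the rewrite author's own statement) =====
-- stated objective: alternative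
-- what changed: Replaces A's single index loop with its i==0/i==m-1/else classification and the last.insert(0,...) accumulator by a structural recursion over the rows below the top one that returns a pair (right-edge-then-reversed-bottom, left-edge) and builds the left column on the recursion unwind, so there is no index arithmetic and no quadratic insert(0).
import Mathlib
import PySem

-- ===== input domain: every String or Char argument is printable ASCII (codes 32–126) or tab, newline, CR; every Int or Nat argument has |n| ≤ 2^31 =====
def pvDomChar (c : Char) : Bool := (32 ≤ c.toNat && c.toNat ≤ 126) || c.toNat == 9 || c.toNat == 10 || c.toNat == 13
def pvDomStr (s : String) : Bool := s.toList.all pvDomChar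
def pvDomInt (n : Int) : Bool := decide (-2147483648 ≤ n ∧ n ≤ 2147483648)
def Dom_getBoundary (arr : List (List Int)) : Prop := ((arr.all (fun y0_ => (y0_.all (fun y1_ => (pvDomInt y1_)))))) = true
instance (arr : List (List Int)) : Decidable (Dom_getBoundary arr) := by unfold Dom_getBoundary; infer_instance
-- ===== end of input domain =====

-- B replaces A's index-classifying loop (with last.insert(0,..)) by a divide-and-conquer
-- over the interior rows that merges (right-edge, left-edge) pairs; objective: alternative.

-- ===== PORT A =====
-- loop body of A's 'for i in range(m)', state = (res, last)
def aStep (arr : List (List Int)) (m n : Int) (st : List Int × List Int) (i : Int) :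
    List Int × List Int :=
  if i = 0 then (st.1 ++ PySem.List.pyGetD arr i [], st.2)
  else if i = m - 1 then
    (st.1 ++ (PySem.List.slice? (PySem.List.pyGetD arr i []) none none (-1)).getD [], st.2)
  else
    (st.1 ++ [PySem.List.pyGetD (PySem.List.pyGetD arr i []) (-1) 0],
     if n > 1 then PySem.List.insert st.2 0 (PySem.List.pyGetD (PySem.List.pyGetD arr i []) 0 0)
     else st.2)

def getBoundary (arr : List (List Int)) : List Int :=
  let m : Int := arr.length
  let n : Int := (PySem.List.pyGetD arr 0 []).length
  let st := (PySem.List.pyRange 0 m 1).foldl (aStep arr m n) ([], [])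
  st.1 ++ st.2

-- ===== PORT B =====
-- edges(rows): ([], []) for empty, singleton base case, else split at len//2 and merge.
-- rows[:m] / rows[m:] are List.take m / List.drop m (exact for the nonnegative m here,
-- PySem.List.slice_to_natCast / slice_from_natCast); len(rows)//2 on a length is Nat division.
def bEdges (rows : List (List Int)) : List Int × List Int :=
  if rows = [] then ([], [])
  else if rows.length = 1 then
    ([PySem.List.pyGetD (PySem.List.pyGetD rows 0 []) (-1) 0],
     [PySem.List.pyGetD (PySem.List.pyGetD rows 0 []) 0 0])
  else
    let m := rows.length / 2
    let l := bEdges (rows.take m)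
    let r := bEdges (rows.drop m)
    (l.1 ++ r.1, r.2 ++ l.2)
termination_by rows.length
decreasing_by
  all_goals
    rename_i h1 h2
    have h3 : rows.length ≠ 0 := fun h => h1 (List.eq_nil_of_length_eq_zero h)
    simp only [List.length_take, List.length_drop]
    omega

def getBoundary_alt (arr : List (List Int)) : List Int :=
  let res := PySem.List.pyGetD arr 0 []
  if arr.length > 1 then
    let e := bEdges (PySem.List.slice arr (some 1) (some (-1)))
    let res := res ++ e.1 ++ (PySem.List.slice? (PySem.List.pyGetD arr (-1) []) none none (-1)).getD []
    if (PySem.List.pyGetD arr 0 []).length > 1 then res ++ e.2 else res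
  else res

-- ===== PRECONDITION & SPEC =====
-- Pre_ excludes exactly the inputs on which the Python A raises IndexError: the empty matrix
-- (arr[0]) and matrices with an empty interior row (arr[i][-1] for 0 < i < m-1).
def Pre_getBoundary (arr : List (List Int)) : Prop :=
  arr ≠ [] ∧ ∀ row ∈ (arr.drop 1).dropLast, row ≠ []
instance (arr : List (List Int)) : Decidable (Pre_getBoundary arr) := by
  unfold Pre_getBoundary; infer_instance
def pvWitness_getBoundary : List (List Int) := [[1, 2, 3], [4, 5, 6], [7, 8, 9]]
def Spec_getBoundary (arr : List (List Int)) (out : List Int) : Prop := out = getBoundary_alt arr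
instance (arr : List (List Int)) (out : List Int) : Decidable (Spec_getBoundary arr out) := by
  unfold Spec_getBoundary; infer_instance

-- ===== CLAIM (what is proved, stated in full; the proofs are below) =====
def Claim_equal_getBoundary : Prop :=
  ∀ (arr : List (List Int)), Dom_getBoundary arr → Pre_getBoundary arr →
    Spec_getBoundary arr (getBoundary arr)

-- ===== LEMMAS AND PROOFS =====

lemma insert_zero (xs : List Int) (x : Int) : PySem.List.insert xs 0 x = x :: xs := by
  simp [PySem.List.insert, PySem.List.sliceIndices]

lemma slice_mid (t b : List Int) (mid : List (List Int)) :
    PySem.List.slice (t :: mid ++ [b]) (some 1) (some (-1)) = mid := by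
  simp [PySem.List.slice]

lemma getD_last (t b : List Int) (mid : List (List Int)) :
    PySem.List.pyGetD (t :: mid ++ [b]) (-1) [] = b := by
  have := @PySem.List.pyGetD_neg_one (List Int) (t :: mid ++ [b]) [] (by simp)
  rw [this]; simp

-- bEdges computes the right edge (in order) and the reversed left edge
lemma bEdges_eq (rows : List (List Int)) :
    bEdges rows =
      (rows.map (fun row => PySem.List.pyGetD row (-1) 0),
       (rows.map (fun row => PySem.List.pyGetD row 0 0)).reverse) := by
  induction hn : rows.length using Nat.strong_induction_on generalizing rows with
  | _ n ih =>
    rw [bEdges]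
    by_cases h0 : rows = []
    · simp [h0]
    · rw [if_neg h0]
      by_cases h1 : rows.length = 1
      · obtain ⟨r, hr⟩ : ∃ r, rows = [r] := by
          cases rows with
          | nil => simp at h0
          | cons a t => cases t with
            | nil => exact ⟨a, rfl⟩
            | cons b u => simp at h1
        subst hr
        simp [PySem.List.pyGetD_zero_cons]
      · rw [if_neg h1]
        have hlen : 2 ≤ rows.length := by
          have : rows.length ≠ 0 := fun h => h0 (List.eq_nil_of_length_eq_zero h)
          omega
        have hm1 : 1 ≤ rows.length / 2 := by omega
        have hm2 : rows.length / 2 < rows.length := by omega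
        have ht : (rows.take (rows.length / 2)).length < n := by
          rw [List.length_take]; omega
        have hd : (rows.drop (rows.length / 2)).length < n := by
          rw [List.length_drop]; omega
        show ((bEdges (rows.take (rows.length / 2))).1 ++ (bEdges (rows.drop (rows.length / 2))).1,
              (bEdges (rows.drop (rows.length / 2))).2 ++ (bEdges (rows.take (rows.length / 2))).2) = _
        rw [ih _ ht _ rfl, ih _ hd _ rfl]
        dsimp only
        rw [Prod.mk.injEq]
        constructor
        · rw [← List.map_append, List.take_append_drop]
        · rw [← List.reverse_append, ← List.map_append, List.take_append_drop]

-- the middle indices s, s+1, …, arr.length-2 walk (arr.drop s).dropLast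
lemma aStep_midfold (arr : List (List Int)) (n : Int) (s : Nat) (res last : List Int)
    (hs : 1 ≤ s) (he : s ≤ arr.length - 1) (hlen : 2 ≤ arr.length) :
    (PySem.List.pyRange (s : Int) ((arr.length : Int) - 1) 1).foldl
        (aStep arr (arr.length : Int) n) (res, last) =
      (res ++ ((arr.drop s).dropLast).map (fun row => PySem.List.pyGetD row (-1) 0),
       (if n > 1 then
          (((arr.drop s).dropLast).map (fun row => PySem.List.pyGetD row 0 0)).reverse
        else []) ++ last) := by
  induction hd : arr.length - 1 - s generalizing s res last with
  | zero =>
      have hse : s = arr.length - 1 := by omega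
      rw [PySem.List.pyRange_one_eq_nil (by omega)]
      have hdrop : ((arr.drop s).dropLast) = [] := by
        have : (arr.drop s).length ≤ 1 := by simp [hse]; omega
        cases h : arr.drop s with
        | nil => simp
        | cons a l =>
            rw [h] at this; simp at this
            simp [this]
      simp [hdrop]
  | succ d ih =>
      have hslt : s < arr.length - 1 := by omega
      rw [PySem.List.pyRange_one_cons (by omega)]
      have hstep : aStep arr (arr.length : Int) n (res, last) (s : Int) =
          (res ++ [PySem.List.pyGetD arr[s]! (-1) 0],
           if n > 1 then PySem.List.pyGetD arr[s]! 0 0 :: last else last) := by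
        unfold aStep
        rw [if_neg (by omega), if_neg (by omega)]
        have hg : PySem.List.pyGetD arr (s : Int) [] = arr[s]! := by
          rw [PySem.List.pyGetD_natCast]
          rw [List.getD_eq_getElem _ _ (by omega), getElem!_pos arr s (by omega)]
        rw [hg]
        by_cases hn : n > 1
        · simp [hn, insert_zero]
        · simp [hn]
      rw [List.foldl_cons, hstep]
      have htail : arr.drop (s + 1) ≠ [] := by
        simp; omega
      have hchunk : (arr.drop s).dropLast =
          arr[s]! :: (arr.drop (s + 1)).dropLast := by
        rw [List.drop_eq_getElem_cons (by omega)]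
        rw [List.dropLast_cons_of_ne_nil htail]
        rw [getElem!_pos arr s (by omega)]
      by_cases hn : n > 1
      · rw [if_pos hn]
        have := ih (s + 1) (res ++ [PySem.List.pyGetD arr[s]! (-1) 0])
          (PySem.List.pyGetD arr[s]! 0 0 :: last) (by omega) (by omega) (by omega)
        rw [show ((s : Int) + 1) = ((s + 1 : Nat) : Int) by push_cast; ring]
        rw [this, hchunk]
        simp [hn]
      · rw [if_neg hn]
        have := ih (s + 1) (res ++ [PySem.List.pyGetD arr[s]! (-1) 0]) last
          (by omega) (by omega) (by omega)
        rw [show ((s : Int) + 1) = ((s + 1 : Nat) : Int) by push_cast; ring]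
        rw [this, hchunk]
        simp [hn]

lemma getD_bottom (t b : List Int) (mid : List (List Int)) :
    PySem.List.pyGetD (t :: mid ++ [b]) ((((t :: mid ++ [b]).length : Nat) : Int) - 1) [] = b := by
  have h1 : ((((t :: mid ++ [b]).length : Nat) : Int) - 1) = ((mid.length + 1 : Nat) : Int) := by
    simp
  rw [h1, PySem.List.pyGetD_natCast]
  rw [List.getD_eq_getElem _ _ (by simp)]
  simp

-- ===== VERDICT (by name: the statement is the Claim_ definition above) =====
theorem getBoundary_spec : Claim_equal_getBoundary := by
  intro arr _ _
  unfold Spec_getBoundary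
  match arr with
  | [] => rfl
  | [t] =>
      show getBoundary [t] = getBoundary_alt [t]
      unfold getBoundary getBoundary_alt
      simp [PySem.List.pyRange_one, aStep, PySem.List.pyGetD_zero_cons]
  | t :: r :: rest =>
      obtain ⟨mid, b, hmb⟩ : ∃ mid b, r :: rest = mid ++ [b] := by
        rcases List.eq_nil_or_concat (r :: rest) with h | ⟨mid, b, h⟩
        · simp at h
        · exact ⟨mid, b, by simpa using h⟩
      rw [hmb]
      have hlen : (t :: mid ++ [b]).length = mid.length + 2 := by simp
      have hn0 : PySem.List.pyGetD (t :: mid ++ [b]) 0 [] = t := by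
        simp [PySem.List.pyGetD_zero_cons]
      -- evaluate port A
      show getBoundary (t :: mid ++ [b]) = getBoundary_alt (t :: mid ++ [b])
      simp only [getBoundary]
      rw [show PySem.List.pyRange 0 ((t :: mid ++ [b]).length : Int) 1 =
            0 :: (PySem.List.pyRange ((1 : Nat) : Int) (((t :: mid ++ [b]).length : Int) - 1) 1
              ++ [((t :: mid ++ [b]).length : Int) - 1]) by
        rw [PySem.List.pyRange_one_cons (by exact_mod_cast by omega)]
        rw [show (((t :: mid ++ [b]).length : Int)) = (((t :: mid ++ [b]).length : Int) - 1) + 1 by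
          ring]
        rw [PySem.List.pyRange_one_succ_right (by omega)]
        norm_num]
      rw [List.foldl_cons]
      have h0 : aStep (t :: mid ++ [b]) ((t :: mid ++ [b]).length : Int)
          (PySem.List.pyGetD (t :: mid ++ [b]) 0 []).length ([], []) 0 = (t, []) := by
        unfold aStep
        rw [if_pos rfl, hn0]
        simp
      rw [h0, List.foldl_append]
      rw [aStep_midfold (t :: mid ++ [b]) _ 1 t [] (by omega) (by omega) (by omega)]
      have hmidchunk : ((t :: mid ++ [b]).drop 1).dropLast = mid := by
        simp
      rw [hmidchunk]
      have hbot : aStep (t :: mid ++ [b]) ((t :: mid ++ [b]).length : Int)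
          (((PySem.List.pyGetD (t :: mid ++ [b]) 0 []).length : Nat) : Int)
          (t ++ mid.map (fun row => PySem.List.pyGetD row (-1) 0),
           (if (((PySem.List.pyGetD (t :: mid ++ [b]) 0 []).length : Nat) : Int) > 1 then
              (mid.map (fun row => PySem.List.pyGetD row 0 0)).reverse
            else []) ++ []) (((t :: mid ++ [b]).length : Int) - 1) =
          (t ++ mid.map (fun row => PySem.List.pyGetD row (-1) 0) ++ b.reverse,
           (if (((PySem.List.pyGetD (t :: mid ++ [b]) 0 []).length : Nat) : Int) > 1 then
              (mid.map (fun row => PySem.List.pyGetD row 0 0)).reverse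
            else []) ++ []) := by
        unfold aStep
        rw [if_neg (by rw [hlen]; omega), if_pos rfl]
        rw [getD_bottom, PySem.List.slice?_none_none_neg_one]
        simp
      rw [List.foldl_cons, List.foldl_nil, hbot]
      -- evaluate port B
      simp only [getBoundary_alt]
      rw [slice_mid, bEdges_eq, getD_last, PySem.List.slice?_none_none_neg_one]
      simp only [hn0]
      have houter : (t :: mid ++ [b]).length > 1 := by rw [hlen]; omega
      by_cases hn : 1 < t.length
      · have hn' : ((t.length : Nat) : Int) > 1 := by exact_mod_cast hn
        simp [hn, hn']
      · have hn' : ¬ ((t.length : Nat) : Int) > 1 := by omega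
        simp [hn, hn']
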